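-- pv_equiv track=rewrite | github.com/allenfengjr/dlrm_comp | SC_script/build_dict.py | array_to_dict_and_keys
-- ===== SOURCE A (Python) =====
-- def array_to_dict_and_keys(arr):
--     unique_rows_dict = {}
--     keys = []
--     next_key = 0
--     for row in arr:
--         row_tuple = tuple(row)
--         if row_tuple not in unique_rows_dict:
--             unique_rows_dict[row_tuple] = next_key
--             next_key += 1
--         keys.append(unique_rows_dict[row_tuple])
--     return unique_rows_dict, keys
-- ===== SOURCE B (Python) =====
-- def array_to_dict_and_keys(arr):
--     # Positional-scan algorithm: no hash-based membership while computing.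
--     # First occurrences are identified by list.index scans; the dict is
--     # materialized only at the end, for the return value.
--     tups = [tuple(r) for r in arr]
--     unique = [t for i, t in enumerate(tups) if tups.index(t) == i]
--     keys = [unique.index(t) for t in tups]
--     return dict(zip(unique, range(len(unique)))), keys
-- ===== Notes on version B (the rewrite author's own statement) =====
-- stated objective: alternative
-- what changed: A maintains a hash dict and counter in one interleaved pass; B uses no hash structure while computing: it selects first occurrences positionally with list.index scans, assigns keys by list.index into the deduplicated list, and only materializes the returned dict at the end from zip(unique, range).
import Mathlib
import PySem

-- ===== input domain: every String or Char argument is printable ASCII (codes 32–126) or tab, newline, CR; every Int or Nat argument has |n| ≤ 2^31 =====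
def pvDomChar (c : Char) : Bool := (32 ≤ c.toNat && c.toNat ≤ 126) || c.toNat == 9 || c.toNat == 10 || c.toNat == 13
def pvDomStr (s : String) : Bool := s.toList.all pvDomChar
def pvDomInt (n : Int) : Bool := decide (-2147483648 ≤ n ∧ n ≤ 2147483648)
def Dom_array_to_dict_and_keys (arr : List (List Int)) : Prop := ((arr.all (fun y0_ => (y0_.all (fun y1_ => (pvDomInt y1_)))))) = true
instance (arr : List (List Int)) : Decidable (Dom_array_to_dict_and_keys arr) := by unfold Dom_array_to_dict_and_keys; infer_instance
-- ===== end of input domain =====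

-- B replaces A's interleaved hash-dict pass by a positional-scan algorithm: first occurrences are
-- selected with list.index scans and keys read off the deduplicated list; the returned dict is
-- only materialized at the end. Equal return values; neither version mutates its argument.

-- ===== PORT A =====
-- the loop body of A: one step over state (unique_rows_dict, keys, next_key)
def pvStepA (st : PySem.Dict (List Int) Int × List Int × Int) (row : List Int) :
    PySem.Dict (List Int) Int × List Int × Int :=
  let d := st.1
  let next := st.2.2
  let (d, next) :=
    if d.contains row then (d, next)
    else (d.insert row next, next + 1)
  -- unique_rows_dict[row_tuple]: the key is always present here (just inserted if it was new),
  -- so Python's d[k] never raises; getD is exact on present keys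
  (d, st.2.1 ++ [d.getD row 0], next)

def array_to_dict_and_keys (arr : List (List Int)) : (List (List Int × Int)) × List Int :=
  let st := arr.foldl pvStepA (PySem.Dict.empty, [], 0)
  (st.1.items, st.2.1)

-- ===== PORT B =====
def array_to_dict_and_keys_alt (arr : List (List Int)) : (List (List Int × Int)) × List Int :=
  let tups := arr.map (fun r => r)       -- tuple(r): identity under the type convention
  -- [t for i, t in enumerate(tups) if tups.index(t) == i]
  let unique := ((PySem.List.enumerate tups).filter
      (fun p => Option.map (fun k : Nat => (k : Int)) (PySem.List.index? tups p.2) == some p.1)).map (fun p => p.2)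
  -- unique.index(t): every t is in unique, so Python's .index never raises; getD is exact there
  let keys := tups.map (fun t => (((PySem.List.index? unique t).getD 0 : Nat) : Int))
  -- dict(zip(unique, range(len(unique))))
  let d := (unique.zip (PySem.List.pyRange 0 (unique.length : Int) 1)).foldl
      (fun d p => d.insert p.1 p.2) PySem.Dict.empty
  (d.items, keys)

-- ===== PRECONDITION & SPEC =====
def Spec_array_to_dict_and_keys (arr : List (List Int)) (out : (List (List Int × Int)) × List Int) : Prop := out = array_to_dict_and_keys_alt arr
instance (arr : List (List Int)) (out : (List (List Int × Int)) × List Int) : Decidable (Spec_array_to_dict_and_keys arr out) := by unfold Spec_array_to_dict_and_keys; infer_instance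

-- ===== CLAIM (what is proved, stated in full; the proofs are below) =====
def Claim_equal_array_to_dict_and_keys : Prop := ∀ (arr : List (List Int)), Dom_array_to_dict_and_keys arr → Spec_array_to_dict_and_keys arr (array_to_dict_and_keys arr)

-- ===== LEMMAS AND PROOFS =====

-- the dict whose items list enumerates u: u[i] ↦ i
def pvDictOf (u : List (List Int)) : PySem.Dict (List Int) Int :=
  PySem.Dict.mk ((PySem.List.enumerate u).map (fun q => (q.2, q.1)))

theorem pvEnumerate_append_singleton (u : List (List Int)) (v : List Int) :
    ∀ s : Int, PySem.List.enumerate (u ++ [v]) s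
      = PySem.List.enumerate u s ++ [(s + u.length, v)] := by
  induction u with
  | nil => intro s; simp [PySem.List.enumerate_nil, PySem.List.enumerate_cons]
  | cons x t ih =>
    intro s
    simp only [List.cons_append, PySem.List.enumerate_cons, ih (s + 1), List.length_cons]
    have h : s + 1 + (t.length : Int) = s + ((t.length + 1 : Nat) : Int) := by push_cast; ring
    rw [h]

theorem pvMem_enumerate (u : List (List Int)) :
    ∀ (s : Int) (k : Nat) (hk : k < u.length), ((s + k, u[k]) ∈ PySem.List.enumerate u s) := by
  induction u with
  | nil => intro _ k hk; simp at hk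
  | cons x t ih =>
    intro s k hk
    cases k with
    | zero => simp [PySem.List.enumerate_cons]
    | succ m =>
      have hm : m < t.length := by simp at hk; omega
      have := ih (s + 1) m hm
      simp only [PySem.List.enumerate_cons, List.mem_cons]
      right
      have : ((s + 1 + (m : Int), t[m]) ∈ PySem.List.enumerate t (s + 1)) := this
      simpa [add_assoc, add_comm, add_left_comm] using this

theorem pvItems_mk (l : List (List Int × Int)) : (PySem.Dict.mk l).items = l := rfl

theorem pvKeys_pvDictOf (u : List (List Int)) : (pvDictOf u).keys = u := by
  simp only [pvDictOf, PySem.Dict.keys, pvItems_mk, List.map_map]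
  exact PySem.List.map_snd_enumerate u 0

theorem pvContains_pvDictOf (u : List (List Int)) (r : List Int) :
    (pvDictOf u).contains r = decide (r ∈ u) := by
  rw [PySem.Dict.contains_eq_decide_mem_keys, pvKeys_pvDictOf]

theorem pvGetD_pvDictOf (u : List (List Int)) (r : List Int)
    (hnd : u.Nodup) (hr : r ∈ u) : (pvDictOf u).getD r 0 = (u.idxOf r : Int) := by
  apply PySem.Dict.getD_of_mem_items
  · have hk : u.idxOf r < u.length := List.idxOf_lt_length_of_mem hr
    have hmem := pvMem_enumerate u 0 (u.idxOf r) hk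
    have hget : u[u.idxOf r] = r := List.getElem_idxOf hk
    have : ((0 + (u.idxOf r : Int), u[u.idxOf r])
        ∈ PySem.List.enumerate u 0) := hmem
    rw [hget] at this
    have := List.mem_map_of_mem (f := fun q : Int × List Int => (q.2, q.1)) this
    simpa [pvDictOf, pvItems_mk] using this
  · rw [pvKeys_pvDictOf]; exact hnd

theorem pvInsert_pvDictOf (u : List (List Int)) (r : List Int) (hr : r ∉ u) :
    (pvDictOf u).insert r (u.length : Int) = pvDictOf (u ++ [r]) := by
  apply PySem.Dict.ext
  rw [PySem.Dict.items_insert_of_not_contains]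
  · simp only [pvDictOf, pvItems_mk, pvEnumerate_append_singleton u r 0, List.map_append]
    simp
  · rw [pvContains_pvDictOf]; simpa using hr

-- Set.update only appends: the old list is a prefix
theorem pvUpdate_exists_suffix (l : List (List Int)) :
    ∀ u : List (List Int), ∃ w, PySem.Set.update u l = u ++ w := by
  induction l with
  | nil => intro u; exact ⟨[], by simp [PySem.Set.update_nil]⟩
  | cons x t ih =>
    intro u
    rw [PySem.Set.update_cons]
    rcases ih (PySem.Set.add u x) with ⟨w, hw⟩
    by_cases hx : x ∈ u
    · rw [PySem.Set.add_of_mem hx] at hw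
      exact ⟨w, by rw [PySem.Set.add_of_mem hx]; exact hw⟩
    · rw [PySem.Set.add_of_not_mem hx] at hw
      exact ⟨x :: w, by rw [PySem.Set.add_of_not_mem hx]; simpa using hw⟩

theorem pvIdxOf_update_of_mem (l : List (List Int)) (u : List (List Int)) (r : List Int)
    (hr : r ∈ u) : (PySem.Set.update u l).idxOf r = u.idxOf r := by
  rcases pvUpdate_exists_suffix l u with ⟨w, hw⟩
  rw [hw]; exact List.idxOf_append_of_mem hr

-- the loop of A, characterised: starting from the state for distinct rows u, processing l
-- dedups l into u and appends the index of each row of l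
theorem pvLoopA (l : List (List Int)) :
    ∀ (u : List (List Int)) (K : List Int), u.Nodup →
    l.foldl pvStepA (pvDictOf u, K, (u.length : Int)) =
      (pvDictOf (PySem.Set.update u l),
       K ++ l.map (fun r => ((PySem.Set.update u l).idxOf r : Int)),
       ((PySem.Set.update u l).length : Int)) := by
  induction l with
  | nil => intro u K _; simp [PySem.Set.update_nil]
  | cons r t ih =>
    intro u K hnd
    rw [List.foldl_cons]
    have hupd : PySem.Set.update u (r :: t) = PySem.Set.update (PySem.Set.add u r) t :=
      PySem.Set.update_cons u r t
    by_cases hr : r ∈ u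
    · have hstep : pvStepA (pvDictOf u, K, (u.length : Int)) r
          = (pvDictOf u, K ++ [(u.idxOf r : Int)], (u.length : Int)) := by
        simp only [pvStepA, pvContains_pvDictOf]
        simp [hr, pvGetD_pvDictOf u r hnd hr]
      rw [hstep, ih u (K ++ [(u.idxOf r : Int)]) hnd]
      rw [hupd, PySem.Set.add_of_mem hr]
      have hidx : (PySem.Set.update u t).idxOf r = u.idxOf r := pvIdxOf_update_of_mem t u r hr
      simp [hidx, List.append_assoc]
    · have hdisj : List.Disjoint u [r] := by
        intro a ha hb
        simp only [List.mem_singleton] at hb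
        exact hr (hb ▸ ha)
      have hnd' : (u ++ [r]).Nodup := List.Nodup.append hnd (List.nodup_singleton r) hdisj
      have hstep : pvStepA (pvDictOf u, K, (u.length : Int)) r
          = (pvDictOf (u ++ [r]), K ++ [(u.length : Int)], ((u ++ [r]).length : Int)) := by
        simp only [pvStepA, pvContains_pvDictOf]
        have hmem : r ∈ u ++ [r] := by simp
        have : (pvDictOf (u ++ [r])).getD r 0 = ((u ++ [r]).idxOf r : Int) :=
          pvGetD_pvDictOf (u ++ [r]) r hnd' hmem
        have hix : (u ++ [r]).idxOf r = u.length := by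
          rw [List.idxOf_append_of_notMem hr]; simp
        simp [hr, pvInsert_pvDictOf u r hr, this, hix]
      rw [hstep, ih (u ++ [r]) (K ++ [(u.length : Int)]) hnd']
      rw [hupd, PySem.Set.add_of_not_mem hr]
      have hmem : r ∈ u ++ [r] := by simp
      have hidx : (PySem.Set.update (u ++ [r]) t).idxOf r = u.length := by
        rw [pvIdxOf_update_of_mem t (u ++ [r]) r hmem, List.idxOf_append_of_notMem hr]; simp
      simp [hidx, List.append_assoc]

-- ===== B-side lemmas =====
theorem pvUpdate_append_acc (l : List (List Int)) :
    ∀ (s w : List (List Int)),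
      PySem.Set.update (s ++ w) l = s ++ PySem.Set.update w (l.filter (fun v => !(s.contains v))) := by
  induction l with
  | nil => intro s w; simp [PySem.Set.update_nil]
  | cons y t ih =>
    intro s w
    rw [PySem.Set.update_cons]
    by_cases hy : y ∈ s
    · have hc : s.contains y = true := by simpa using hy
      have hadd : PySem.Set.add (s ++ w) y = s ++ w := PySem.Set.add_of_mem (by simp [hy])
      rw [hadd, ih s w]
      simp [hy]
    · have hc : s.contains y = false := by simpa using hy
      have hadd : PySem.Set.add (s ++ w) y = s ++ PySem.Set.add w y := by
        by_cases hw : y ∈ w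
        · rw [PySem.Set.add_of_mem (by simp [hw]), PySem.Set.add_of_mem hw]
        · rw [PySem.Set.add_of_not_mem (by simp [hy, hw]), PySem.Set.add_of_not_mem hw,
            List.append_assoc]
      rw [hadd, ih s (PySem.Set.add w y)]
      simp only [List.filter_cons, hc, Bool.not_false, if_true]
      rw [PySem.Set.update_cons]
theorem pvFilter_update (p : List Int → Bool) (t : List (List Int)) :
    ∀ s : List (List Int),
      (PySem.Set.update s t).filter p = PySem.Set.update (s.filter p) (t.filter p) := by
  induction t with
  | nil => intro s; simp [PySem.Set.update_nil]
  | cons y l ih =>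
    intro s
    rw [PySem.Set.update_cons, List.filter_cons]
    by_cases hy : y ∈ s
    · rw [PySem.Set.add_of_mem hy, ih s]
      cases hp : p y
      · simp
      · have : PySem.Set.add (s.filter p) y = s.filter p :=
          PySem.Set.add_of_mem (List.mem_filter.2 ⟨hy, hp⟩)
        simp [PySem.Set.update_cons, this]
    · rw [PySem.Set.add_of_not_mem hy, ih (s ++ [y])]
      have hny : y ∉ s.filter p := fun h => hy (List.mem_filter.1 h).1
      cases hp : p y
      · simp [List.filter_append, hp]
      · simp only [List.filter_append, List.filter_cons, hp, if_true, List.filter_nil,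
          PySem.Set.update_cons]
        rw [PySem.Set.add_of_not_mem hny]
theorem pvDedup_cons (x : List Int) (t : List (List Int)) :
    PySem.List.dedup (x :: t) = x :: (PySem.List.dedup t).filter (fun v => !(v == x)) := by
  have hx : PySem.Set.add ([] : List (List Int)) x = [x] := by
    rw [PySem.Set.add_of_not_mem (List.not_mem_nil)]; rfl
  have h1 : PySem.List.dedup (x :: t) = PySem.Set.update [x] t := by
    rw [PySem.List.dedup_eq_ofList, ← PySem.Set.update_nil_left, PySem.Set.update_cons, hx]
  have h2 := pvUpdate_append_acc t [x] []
  have h3 : t.filter (fun v => !(([x] : List (List Int)).contains v))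
      = t.filter (fun v => !(v == x)) := by
    apply List.filter_congr; intro v _
    rw [beq_eq_decide]; simp [eq_comm]
  have h4 : (PySem.List.dedup t).filter (fun v => !(v == x))
      = PySem.Set.update [] (t.filter (fun v => !(v == x))) := by
    have := pvFilter_update (fun v => !(v == x)) t []
    rw [PySem.Set.update_nil_left, ← PySem.List.dedup_eq_ofList] at this
    simpa using this
  rw [h1]
  have : ([x] : List (List Int)) = [x] ++ [] := by simp
  rw [this, h2, h3, ← h4]
  simp
theorem pvFilterEnum (t : List (List Int)) :
    ∀ s : Int,
      ((PySem.List.enumerate t s).filter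
        (fun p => Option.map (fun k : Nat => (k : Int) + s) (PySem.List.index? t p.2) == some p.1)).map (fun p => p.2)
      = PySem.List.dedup t := by
  induction t with
  | nil => intro s; simp [PySem.List.enumerate_nil, PySem.List.dedup_eq_ofList]
  | cons x t ih =>
    intro s
    rw [PySem.List.enumerate_cons, List.filter_cons]
    have hhead : (Option.map (fun k : Nat => (k : Int) + s)
        (PySem.List.index? (x :: t) ((s, x) : Int × List Int).2) == some ((s, x) : Int × List Int).1) = true := by
      rw [PySem.List.index?_cons_self]; simp
    rw [hhead]
    simp only [if_true, List.map_cons]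
    have hcong : ∀ p ∈ PySem.List.enumerate t (s + 1),
        (Option.map (fun k : Nat => (k : Int) + s) (PySem.List.index? (x :: t) p.2) == some p.1)
        = ((!(p.2 == x)) && (Option.map (fun k : Nat => (k : Int) + (s + 1)) (PySem.List.index? t p.2) == some p.1)) := by
      intro p hp
      rcases (PySem.List.mem_enumerate_iff t (s + 1) p).1 hp with ⟨k, hk, rfl⟩
      by_cases hx : t[k] = x
      · simp only [hx]
        rw [show ((x == x) = true) from by simp]
        rw [PySem.List.index?_cons_self]
        simp only [Option.map_some, Bool.not_true, Bool.false_and, beq_eq_false_iff_ne, ne_eq,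
          Option.some.injEq]
        omega
      · rw [PySem.List.index?_cons_of_ne t (fun h => hx h.symm)]
        rw [show ((t[k] == x) = false) from by simp [hx]]
        simp only [Bool.not_false, Bool.true_and, Option.map_map]
        congr 2
        funext m
        simp only [Function.comp]
        push_cast; ring
    rw [List.filter_congr hcong]
    have hsplit : (PySem.List.enumerate t (s + 1)).filter
        (fun p => (!(p.2 == x)) && (Option.map (fun k : Nat => (k : Int) + (s + 1)) (PySem.List.index? t p.2) == some p.1))
        = ((PySem.List.enumerate t (s + 1)).filter
            (fun p => Option.map (fun k : Nat => (k : Int) + (s + 1)) (PySem.List.index? t p.2) == some p.1)).filter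
          (fun p => !(p.2 == x)) := by
      rw [List.filter_filter]
    rw [hsplit]
    have hmapfil : (((PySem.List.enumerate t (s + 1)).filter
            (fun p => Option.map (fun k : Nat => (k : Int) + (s + 1)) (PySem.List.index? t p.2) == some p.1)).filter
          ((fun v => !(v == x)) ∘ Prod.snd)).map Prod.snd
        = (((PySem.List.enumerate t (s + 1)).filter
            (fun p => Option.map (fun k : Nat => (k : Int) + (s + 1)) (PySem.List.index? t p.2) == some p.1)).map Prod.snd).filter
          (fun v => !(v == x)) := (List.filter_map).symm
    have hfun : (fun p : Int × List Int => !(p.2 == x)) = ((fun v => !(v == x)) ∘ Prod.snd) := rfl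
    rw [hfun, hmapfil]
    have hih : ((PySem.List.enumerate t (s + 1)).filter
        (fun p => Option.map (fun k : Nat => (k : Int) + (s + 1)) (PySem.List.index? t p.2) == some p.1)).map Prod.snd
        = PySem.List.dedup t := ih (s + 1)
    rw [hih, ← pvDedup_cons]
theorem pvZip_range (u : List (List Int)) :
    ∀ s : Int, u.zip (PySem.List.pyRange s (s + u.length) 1)
      = (PySem.List.enumerate u s).map (fun q => (q.2, q.1)) := by
  induction u with
  | nil => intro s; simp [PySem.List.enumerate_nil]
  | cons x t ih =>
    intro s
    have hlt : s < s + ((t.length + 1 : Nat) : Int) := by push_cast; omega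
    rw [List.length_cons, PySem.List.pyRange_one_cons hlt]
    have harg : s + ((t.length + 1 : Nat) : Int) = (s + 1) + (t.length : Int) := by push_cast; ring
    rw [harg]
    simp only [List.zip_cons_cons, PySem.List.enumerate_cons, List.map_cons, ih (s + 1)]
theorem pvIdxOf?_eq_some (l : List (List Int)) (v : List Int) (h : v ∈ l) :
    List.idxOf? v l = some (l.idxOf v) := by
  induction l with
  | nil => simp at h
  | cons x t ih =>
    by_cases hx : x = v
    · subst hx; simp [List.idxOf?_cons]
    · have hb : (x == v) = false := by simp [hx]
      simp only [List.idxOf?_cons, List.idxOf_cons, hb]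
      simp at h
      rcases h with h | h
      · exact absurd h.symm hx
      · simp [ih h]
theorem pvIndexGetD (l : List (List Int)) (v : List Int) (hv : v ∈ l) :
    (PySem.List.index? l v).getD 0 = l.idxOf v := by
  rw [PySem.List.index?_eq_idxOf?, pvIdxOf?_eq_some l v hv]
  rfl
theorem pvDictB_eq (u : List (List Int)) (hnd : u.Nodup) :
    (u.zip (PySem.List.pyRange 0 (u.length : Int) 1)).foldl
        (fun d p => d.insert p.1 p.2) PySem.Dict.empty = pvDictOf u := by
  have h0 : (0 : Int) + (u.length : Int) = (u.length : Int) := by ring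
  rw [show PySem.List.pyRange 0 (u.length : Int) 1 = PySem.List.pyRange 0 (0 + (u.length : Int)) 1 from by rw [h0],
    pvZip_range u 0]
  apply PySem.Dict.ext
  have h := PySem.Dict.items_foldl_insert_fresh
      (l := (PySem.List.enumerate u 0).map (fun q => (q.2, q.1)))
      (k := fun p => p.1) (v := fun p => p.2) (d := PySem.Dict.empty)
      (by intro a _; exact PySem.Dict.contains_empty _)
      (by simp only [List.map_map]
          have : ((fun p : List Int × Int => p.1) ∘ (fun q : Int × List Int => (q.2, q.1))) = (fun q : Int × List Int => q.2) := rfl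
          rw [this]
          simpa [PySem.List.map_snd_enumerate] using hnd)
  simpa [pvDictOf, pvItems_mk] using h

-- ===== VERDICT (by name: the statement is the Claim_ definition above) =====
theorem array_to_dict_and_keys_spec : Claim_equal_array_to_dict_and_keys := by
  intro arr _
  unfold Spec_array_to_dict_and_keys array_to_dict_and_keys array_to_dict_and_keys_alt
  dsimp only
  rw [List.map_id']
  have hcond : ∀ p : Int × List Int,
      (Option.map (fun k : Nat => (k : Int)) (PySem.List.index? arr p.2) == some p.1)
        = (Option.map (fun k : Nat => (k : Int) + 0) (PySem.List.index? arr p.2) == some p.1) := by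
    intro p; simp
  rw [List.filter_congr (fun p _ => hcond p), pvFilterEnum arr 0]
  have hdedup : PySem.List.dedup arr = PySem.Set.update [] arr := by
    simp [PySem.List.dedup_eq_ofList, PySem.Set.update_nil_left]
  have hnd : (PySem.List.dedup arr).Nodup := PySem.List.nodup_dedup arr
  have hA := pvLoopA arr [] [] (by simp)
  have hempty : (pvDictOf [] : PySem.Dict (List Int) Int) = PySem.Dict.empty := rfl
  rw [hempty] at hA
  simp only [List.length_nil, Int.natCast_zero] at hA
  rw [hA, pvDictB_eq (PySem.List.dedup arr) hnd]
  simp only [← hdedup, List.nil_append]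
  refine congrArg₂ Prod.mk rfl ?_
  apply List.map_congr_left
  intro r hr
  rw [pvIndexGetD (PySem.List.dedup arr) r ((PySem.List.mem_dedup arr r).2 hr)]
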